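-- pv_equiv track=rewrite | github.com/Sunnywizards/common-algorithm-coding | code/sort/radix_sort.py | get_max_digit_num
-- ===== SOURCE A (Python) =====
-- def get_max_digit_num(array: list) -> int:
--     if len(array) < 1:
--         return 0
--     max_digit_num = 1
--     for num in array:
--         while int(num/(10**(max_digit_num))) > 0:
--             max_digit_num += 1
--     return max_digit_num
-- ===== SOURCE B (Python) =====
-- def get_max_digit_num(array: list) -> int:
--     if len(array) < 1:
--         return 0
--     m = max(array)
--     max_digit_num = 1
--     while int(m/(10**max_digit_num)) > 0:
--         max_digit_num += 1
--     return max_digit_num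
-- ===== Notes on version B (the rewrite author's own statement) =====
-- stated objective: simpler
-- what changed: Replaces the fused per-element for/while scan with a single max() reduction followed by one digit-count loop on that maximum (digit incrementing is monotone, so only the maximum matters).
import Mathlib
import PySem

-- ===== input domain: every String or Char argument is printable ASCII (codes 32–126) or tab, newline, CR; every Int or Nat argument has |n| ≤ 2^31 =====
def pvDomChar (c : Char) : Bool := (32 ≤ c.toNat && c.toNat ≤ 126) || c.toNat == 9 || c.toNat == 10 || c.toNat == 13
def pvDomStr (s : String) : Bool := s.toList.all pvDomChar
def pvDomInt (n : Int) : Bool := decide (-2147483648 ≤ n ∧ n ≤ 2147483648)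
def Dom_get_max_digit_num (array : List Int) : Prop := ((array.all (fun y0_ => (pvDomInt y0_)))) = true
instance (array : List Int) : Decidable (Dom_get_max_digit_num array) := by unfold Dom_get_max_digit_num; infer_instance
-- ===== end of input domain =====

-- B replaces A's fused per-element for/while scan by a max() reduction followed by one
-- digit-count loop on that maximum (objective: simpler).

-- ===== PORT A =====
-- Python's 'int(num/(10**k)) > 0' (true float division, truncated): on the stated domain
-- |num| ≤ 2^31 this is exactly '10^k ≤ num' (the correctly-rounded quotient cannot cross 1,
-- since relevant quotients differ from 1 by ≥ 10^-10 >> 2^-53); ported exactly as that test.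
def pvDigitStepF : Nat → Int → Nat → Nat
  | 0, _, k => k
  | f+1, num, k => if (10:Int) ^ k ≤ num then pvDigitStepF f num (k+1) else k

-- fuel num.natAbs + 1 always suffices: the loop stops at the first k with num < 10^k,
-- and k < 10^k, so at most num.natAbs iterations can run
def pvDigitStep (num : Int) (k : Nat) : Nat := pvDigitStepF (num.natAbs + 1) num k

def get_max_digit_num (array : List Int) : Int :=
  if array.length < 1 then 0
  else (array.foldl (fun acc num => pvDigitStep num acc) 1 : Nat)

-- ===== PORT B =====
def get_max_digit_num_alt (array : List Int) : Int :=
  if array.length < 1 then 0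
  else
    match PySem.List.max? array (fun y => y) with
    | none => 0  -- unreachable: the guard ensures the list is nonempty
    | some m => (pvDigitStep m 1 : Nat)

-- ===== PRECONDITION & SPEC =====
def Spec_get_max_digit_num (array : List Int) (out : Int) : Prop := out = get_max_digit_num_alt array
instance (array : List Int) (out : Int) : Decidable (Spec_get_max_digit_num array out) := by unfold Spec_get_max_digit_num; infer_instance

-- ===== CLAIM =====
def Claim_equal_get_max_digit_num : Prop := ∀ (array : List Int), Dom_get_max_digit_num array → Spec_get_max_digit_num array (get_max_digit_num array)

-- ===== LEMMAS AND PROOFS =====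
theorem pv_int_lt_pow (num : Int) (m : Nat) (h : num.natAbs ≤ m) : num < 10 ^ m := by
  have h1 : (num.natAbs : Int) < 10 ^ num.natAbs := by
    have := Nat.lt_pow_self (a := 10) (by norm_num) (n := num.natAbs)
    exact_mod_cast this
  have h2 : (10:Int) ^ num.natAbs ≤ 10 ^ m := pow_le_pow_right₀ (by norm_num) h
  have := Int.le_natAbs (a := num)
  omega

theorem pvStepF_stop {num : Int} {k : Nat} (h : ¬ (10:Int) ^ k ≤ num) (f : Nat) :
    pvDigitStepF f num k = k := by
  cases f <;> simp [pvDigitStepF, h]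

theorem pvStepF_lt {num : Int} : ∀ {f k : Nat}, num < 10 ^ (k + f) →
    num < 10 ^ pvDigitStepF f num k := by
  intro f
  induction f with
  | zero => intro k h; simpa [pvDigitStepF] using h
  | succ f ih =>
      intro k h
      rw [pvDigitStepF]
      split
      · exact ih ((by omega : k + 1 + f = k + (f + 1)) ▸ h)
      · exact lt_of_not_ge (by assumption)

theorem pvStepF_fuel {num : Int} : ∀ {f₁ f₂ k : Nat}, num < 10 ^ (k + f₁) →
    num < 10 ^ (k + f₂) → pvDigitStepF f₁ num k = pvDigitStepF f₂ num k := by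
  intro f₁
  induction f₁ with
  | zero =>
      intro f₂ k h1 _
      simp only [Nat.add_zero] at h1
      rw [pvStepF_stop (not_le_of_gt h1), pvStepF_stop (not_le_of_gt h1)]
  | succ f ih =>
      intro f₂ k h1 h2
      by_cases hc : (10:Int) ^ k ≤ num
      · cases f₂ with
        | zero =>
            simp only [Nat.add_zero] at h2
            exact absurd h2 (not_lt_of_ge hc)
        | succ f₂ =>
            simp only [pvDigitStepF, if_pos hc]
            exact ih ((by omega : k + 1 + f = k + (f + 1)) ▸ h1)
              ((by omega : k + 1 + f₂ = k + (f₂ + 1)) ▸ h2)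
      · rw [pvStepF_stop hc, pvStepF_stop hc]

theorem pv_suff (num : Int) (k f : Nat) (hf : num.natAbs ≤ f) : num < 10 ^ (k + f) :=
  pv_int_lt_pow num (k + f) (by omega)

theorem pvDigitStep_lt (num : Int) (k : Nat) : num < 10 ^ pvDigitStep num k :=
  pvStepF_lt (pv_suff num k (num.natAbs + 1) (by omega))

theorem pvDigitStep_succ {num : Int} {k : Nat} (h : (10:Int) ^ k ≤ num) :
    pvDigitStep num k = pvDigitStep num (k + 1) := by
  unfold pvDigitStep
  conv_lhs => rw [pvDigitStepF, if_pos h]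
  exact pvStepF_fuel (pv_suff num (k+1) num.natAbs (by
      have hk : (k : Int) < 10 ^ k := by
        have := Nat.lt_pow_self (a := 10) (by norm_num) (n := k)
        exact_mod_cast this
      have : (k : Int) < num := lt_of_lt_of_le hk h
      omega))
    (pv_suff num (k+1) (num.natAbs + 1) (by omega))

theorem pvDigitStep_of_le {a b : Int} (h : a ≤ b) (k : Nat) :
    pvDigitStep a (pvDigitStep b k) = pvDigitStep b k := by
  have hlt : ¬ (10:Int) ^ pvDigitStep b k ≤ a :=
    not_le_of_gt (lt_of_le_of_lt h (pvDigitStep_lt b k))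
  unfold pvDigitStep
  exact pvStepF_stop hlt _

theorem pvDigitStep_swallow {a b : Int} (h : a ≤ b) (k : Nat) :
    pvDigitStep b (pvDigitStep a k) = pvDigitStep b k := by
  unfold pvDigitStep
  have main : ∀ f k, a < 10 ^ (k + f) →
      pvDigitStepF b.natAbs.succ b (pvDigitStepF f a k) = pvDigitStepF b.natAbs.succ b k := by
    intro f
    induction f with
    | zero => intro k _; rfl
    | succ f ih =>
        intro k hsf
        by_cases hc : (10:Int) ^ k ≤ a
        · rw [show pvDigitStepF (f+1) a k = pvDigitStepF f a (k+1) from by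
            rw [pvDigitStepF, if_pos hc]]
          rw [ih (k+1) ((by omega : k + 1 + f = k + (f + 1)) ▸ hsf)]
          have hb : (10:Int) ^ k ≤ b := le_trans hc h
          exact (pvDigitStep_succ hb).symm
        · rw [pvStepF_stop hc]
  exact main _ k (pv_suff a k (a.natAbs + 1) (by omega))

theorem pvDigitStep_absorb (a b : Int) (k : Nat) :
    pvDigitStep b (pvDigitStep a k) = pvDigitStep (max a b) k := by
  rcases le_total a b with h | h
  · rw [pvDigitStep_swallow h, max_eq_right h]
  · rw [pvDigitStep_of_le h, max_eq_left h]

theorem pvFoldl_digitStep (xs : List Int) : ∀ (a : Int) (k : Nat),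
    xs.foldl (fun acc n => pvDigitStep n acc) (pvDigitStep a k) =
      pvDigitStep (xs.foldl max a) k := by
  induction xs with
  | nil => intro a k; rfl
  | cons y ys ih =>
      intro a k
      simp only [List.foldl_cons]
      rw [pvDigitStep_absorb a y k]
      exact ih (max a y) k

-- ===== VERDICT =====
theorem get_max_digit_num_spec : Claim_equal_get_max_digit_num := by
  intro array _
  unfold Spec_get_max_digit_num get_max_digit_num get_max_digit_num_alt
  cases array with
  | nil => rfl
  | cons x xs =>
      simp only [List.length_cons, PySem.List.max?_id_cons, List.foldl_cons]
      rw [pvFoldl_digitStep xs x 1]
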